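-- pv_equiv track=rewrite | github.com/star-centauri/eMOC | project.py | check_text_file_type
-- ===== SOURCE A (Python) =====
-- def check_text_file_type(rows):
--     """
--     check text file
--     returns separator and number of fields (if unique)
--     """
--     separators = "\t,;"
--     for separator in separators:
--         cs = []
--         for row in rows:
--
--             cs.append(row.count(separator))
--         if len(set(cs)) == 1:
--             return separator, cs[0] + 1
--     return None, None
-- ===== SOURCE B (Python) =====
-- def check_text_file_type(rows):
--     """
--     check text file
--     returns separator and number of fields (if unique)
--     """
--     if not rows:
--         return None, None
--
--     def tally(row):
--         t = c = s = 0
--         for ch in row: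
--             if ch == "\t":
--                 t += 1
--             elif ch == ",":
--                 c += 1
--             elif ch == ";":
--                 s += 1
--         return t, c, s
--
--     bt, bc, bs = tally(rows[0])
--     okt = okc = oks = True
--     for row in rows[1:]:
--         t, c, s = tally(row)
--         okt = okt and t == bt
--         okc = okc and c == bc
--         oks = oks and s == bs
--     if okt:
--         return "\t", bt + 1
--     if okc:
--         return ",", bc + 1
--     if oks:
--         return ";", bs + 1
--     return None, None
-- ===== Notes on version B (the rewrite author's own statement) =====
-- stated objective: alternative
-- what changed: B streams the rows once with a single character-level scan per row tallying all three separators simultaneously, keeping only the first row's three counts and three boolean uniformity flags (O(1) extra memory, no count lists and no per-separator rescans), then returns the first separator whose flag survived; A instead loops over separators and rebuilds a full count list per separator via str.count, testing uniqueness with set().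
import Mathlib
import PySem

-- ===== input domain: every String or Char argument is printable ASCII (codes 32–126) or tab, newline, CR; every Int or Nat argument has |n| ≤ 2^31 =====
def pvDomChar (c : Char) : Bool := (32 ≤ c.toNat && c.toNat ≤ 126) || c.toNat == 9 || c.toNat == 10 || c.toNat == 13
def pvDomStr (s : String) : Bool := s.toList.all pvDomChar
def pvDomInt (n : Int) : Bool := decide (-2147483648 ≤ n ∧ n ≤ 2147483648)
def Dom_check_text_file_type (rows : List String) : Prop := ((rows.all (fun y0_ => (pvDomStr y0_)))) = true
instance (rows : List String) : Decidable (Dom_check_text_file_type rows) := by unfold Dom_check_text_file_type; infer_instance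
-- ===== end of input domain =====

-- B replaces A's per-separator rescans (str.count + full count lists + set() test) by a
-- single streaming pass: one character-level scan per row tallies all three separators at
-- once, and only the first row's counts plus three boolean uniformity flags are kept
-- ("alternative": same cost, different algorithmic structure, O(1) extra memory).

-- ===== PORT A =====
-- cs = []; for row in rows: cs.append(row.count(separator))
def aCounts (rows : List String) (sep : String) : List Int :=
  rows.foldl (fun cs row => cs ++ [((PySem.Str.count row sep : Nat) : Int)]) []

-- 'for separator in separators: … return …'; cs[0] is only reached when
-- len(set(cs)) == 1, so cs is nonempty there and pyGetD's default 0 is never used.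
def aGo (rows : List String) : List String → Option String × Option Int
  | [] => (none, none)
  | sep :: rest =>
    let cs := aCounts rows sep
    if PySem.Set.len (PySem.Set.ofList cs) == 1 then
      (some sep, some (PySem.List.pyGetD cs 0 0 + 1))
    else aGo rows rest

def check_text_file_type (rows : List String) : Option String × Option Int :=
  aGo rows ["\t", ",", ";"]

-- ===== PORT B =====
-- t = c = s = 0; for ch in row: if/elif/elif — one char-level scan tallying all three
def bTally (row : String) : Int × Int × Int :=
  row.toList.foldl
    (fun t ch =>
      if ch == '\t' then (t.1 + 1, t.2.1, t.2.2)
      else if ch == ',' then (t.1, t.2.1 + 1, t.2.2)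
      else if ch == ';' then (t.1, t.2.1, t.2.2 + 1)
      else t)
    (0, 0, 0)

def check_text_file_type_alt (rows : List String) : Option String × Option Int :=
  match rows with
  | [] => (none, none)
  | first :: rest =>
    let base := bTally first
    -- okt = okc = oks = True; for row in rows[1:]: okX = okX and tally(row)[X] == baseX
    let ok := rest.foldl
      (fun ok row =>
        let cur := bTally row
        (ok.1 && (cur.1 == base.1), ok.2.1 && (cur.2.1 == base.2.1),
         ok.2.2 && (cur.2.2 == base.2.2)))
      (true, true, true)
    if ok.1 then (some "\t", some (base.1 + 1))
    else if ok.2.1 then (some ",", some (base.2.1 + 1))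
    else if ok.2.2 then (some ";", some (base.2.2 + 1))
    else (none, none)

-- ===== PRECONDITION & SPEC =====
def Spec_check_text_file_type (rows : List String) (out : Option String × Option Int) : Prop := out = check_text_file_type_alt rows
instance (rows : List String) (out : Option String × Option Int) : Decidable (Spec_check_text_file_type rows out) := by unfold Spec_check_text_file_type; infer_instance

-- ===== CLAIM (what is proved, stated in full; the proofs are below) =====
def Claim_equal_check_text_file_type : Prop := ∀ (rows : List String), Dom_check_text_file_type rows → Spec_check_text_file_type rows (check_text_file_type rows)

-- ===== LEMMAS AND PROOFS =====

-- Python's row.count(c) for a one-character needle is the character count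
theorem count_go_singleton (c : Char) :
    ∀ (l : List Char) (fuel acc : Nat), l.length ≤ fuel →
      PySem.Chars.count.go [c] fuel l acc = acc + l.count c := by
  intro l
  induction l with
  | nil => intro fuel acc _; cases fuel <;> simp [PySem.Chars.count.go]
  | cons h t ih =>
    intro fuel acc hle
    cases fuel with
    | zero => simp at hle
    | succ fuel =>
      have hle' : t.length ≤ fuel := by simpa using hle
      by_cases hc : c = h
      · have hp : List.isPrefixOf [c] (h :: t) = true := by simp [List.isPrefixOf, hc]
        simp only [PySem.Chars.count.go, hp, if_pos]
        rw [show List.drop (List.length [c]) (h :: t) = t by simp]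
        rw [ih fuel (acc + 1) hle']
        simp [hc]
        omega
      · have hp : List.isPrefixOf [c] (h :: t) = false := by
          simp [List.isPrefixOf]
          intro e; exact (hc e).elim
        simp only [PySem.Chars.count.go, hp]
        rw [ih fuel acc hle']
        have : (h :: t).count c = t.count c := by
          simp [List.count_cons]
          intro e; exact (hc e.symm).elim
        rw [this]
        simp

theorem count_singleton (s : List Char) (c : Char) :
    PySem.Chars.count s [c] = s.count c := by
  simpa [PySem.Chars.count] using count_go_singleton c s s.length 0 le_rfl

-- the char-level tally computes the three character counts
theorem bTally_eq (row : String) :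
    bTally row = ((row.toList.count '\t' : Int), (row.toList.count ',' : Int),
                  (row.toList.count ';' : Int)) := by
  unfold bTally
  suffices h : ∀ (l : List Char) (a b c : Int),
      l.foldl
        (fun t ch =>
          if ch == '\t' then (t.1 + 1, t.2.1, t.2.2)
          else if ch == ',' then (t.1, t.2.1 + 1, t.2.2)
          else if ch == ';' then (t.1, t.2.1, t.2.2 + 1)
          else t)
        (a, b, c)
      = (a + (l.count '\t' : Int), b + (l.count ',' : Int), c + (l.count ';' : Int)) by
    simpa using h row.toList 0 0 0
  intro l
  induction l with
  | nil => simp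
  | cons ch t ih =>
    intro a b c
    simp only [List.foldl_cons]
    by_cases h1 : (ch == '\t') = true
    · rw [if_pos h1, ih]
      have e : ch = '\t' := eq_of_beq h1
      simp [e, Prod.ext_iff]
      omega
    · rw [if_neg (by simp_all)]
      by_cases h2 : (ch == ',') = true
      · rw [if_pos h2, ih]
        have e : ch = ',' := eq_of_beq h2
        simp [e, Prod.ext_iff]
        omega
      · rw [if_neg (by simp_all)]
        by_cases h3 : (ch == ';') = true
        · rw [if_pos h3, ih]
          have e : ch = ';' := eq_of_beq h3
          simp [e, Prod.ext_iff]
          omega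
        · rw [if_neg (by simp_all), ih]
          have e1 : ch ≠ '\t' := by simp_all
          have e2 : ch ≠ ',' := by simp_all
          have e3 : ch ≠ ';' := by simp_all
          simp [e1, e2, e3]

-- A's count list is a map
theorem aCounts_eq_map (rows : List String) (sep : String) :
    aCounts rows sep = rows.map (fun row => ((PySem.Str.count row sep : Nat) : Int)) := by
  simpa [aCounts] using
    PySem.List.foldl_append_singleton_eq_map
      (fun row => ((PySem.Str.count row sep : Nat) : Int)) rows []

-- a nodup list all of whose members equal c is [] or [c]
theorem nodup_all_eq {l : List Int} {c : Int} (hnd : l.Nodup) (h : ∀ x ∈ l, x = c) :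
    l = [] ∨ l = [c] := by
  match l with
  | [] => exact Or.inl rfl
  | a :: t =>
    right
    have ha : a = c := h a (by simp)
    have ht : t = [] := by
      cases t with
      | nil => rfl
      | cons b u =>
        exfalso
        have hb : b = c := h b (by simp)
        have : a ∉ (b :: u) := (List.nodup_cons.mp hnd).1
        exact this (by simp [ha, hb])
    simp [ha, ht]

-- A's 'len(set(cs)) == 1' on a nonempty list is B's all-equal-to-head flag
theorem setlen_one_eq_all (c0 : Int) (cs : List Int) :
    (PySem.Set.len (PySem.Set.ofList (c0 :: cs)) == 1) = cs.all (· == c0) := by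
  by_cases hall : cs.all (· == c0)
  · have hmemall : ∀ x ∈ PySem.Set.ofList (c0 :: cs), x = c0 := by
      intro x hx
      have hx' : x ∈ c0 :: cs := (PySem.Set.mem_ofList _ _).mp hx
      rcases List.mem_cons.mp hx' with h | h
      · exact h
      · exact eq_of_beq (List.all_eq_true.mp hall x h)
    have hc0 : c0 ∈ PySem.Set.ofList (c0 :: cs) :=
      (PySem.Set.mem_ofList _ _).mpr (by simp)
    have hone : PySem.Set.ofList (c0 :: cs) = [c0] := by
      rcases nodup_all_eq (PySem.Set.nodup_ofList (c0 :: cs)) hmemall with h | h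
      · exact absurd (h ▸ hc0) (by simp)
      · exact h
    simp [hall, hone, PySem.Set.len]
  · have hlen : ¬ (PySem.Set.ofList (c0 :: cs)).length = 1 := by
      intro hlen1
      obtain ⟨y, hy⟩ := List.length_eq_one_iff.mp hlen1
      have hc0 : c0 ∈ PySem.Set.ofList (c0 :: cs) :=
        (PySem.Set.mem_ofList _ _).mpr (by simp)
      have hyc0 : y = c0 := by
        rw [hy] at hc0; exact (List.mem_singleton.mp hc0).symm
      apply hall
      rw [List.all_eq_true]
      intro x hx
      have hxm : x ∈ PySem.Set.ofList (c0 :: cs) :=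
        (PySem.Set.mem_ofList _ _).mpr (List.mem_cons_of_mem _ hx)
      rw [hy, hyc0] at hxm
      simpa using hxm
    have h1 : (PySem.Set.len (PySem.Set.ofList (c0 :: cs)) == 1) = false := by
      simp only [PySem.Set.len, beq_eq_false_iff_ne, ne_eq]
      exact_mod_cast hlen
    rw [h1]
    exact (Bool.eq_false_iff.mpr (by simpa using hall)).symm

-- B's flag fold computes the three all-equal flags componentwise
theorem flags_fold (base : Int × Int × Int) (rest : List String) :
    ∀ (a b c : Bool),
      rest.foldl
        (fun ok row =>
          let cur := bTally row
          (ok.1 && (cur.1 == base.1), ok.2.1 && (cur.2.1 == base.2.1),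
           ok.2.2 && (cur.2.2 == base.2.2)))
        (a, b, c)
      = (a && rest.all (fun r => (bTally r).1 == base.1),
         b && rest.all (fun r => (bTally r).2.1 == base.2.1),
         c && rest.all (fun r => (bTally r).2.2 == base.2.2)) := by
  induction rest with
  | nil => simp
  | cons r rs ih =>
    intro a b c
    simp only [List.foldl_cons]
    rw [ih]
    simp [Bool.and_assoc]

-- row.count(sep) (A's per-row value) = the matching component of B's tally
theorem countTab (row : String) :
    ((PySem.Str.count row "\t" : Nat) : Int) = (bTally row).1 := by
  rw [PySem.Str.count_eq, bTally_eq]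
  norm_num [count_singleton, show ("\t".toList) = ['\t'] from rfl]

theorem countComma (row : String) :
    ((PySem.Str.count row "," : Nat) : Int) = (bTally row).2.1 := by
  rw [PySem.Str.count_eq, bTally_eq]
  norm_num [count_singleton, show (",".toList) = [','] from rfl]

theorem countSemi (row : String) :
    ((PySem.Str.count row ";" : Nat) : Int) = (bTally row).2.2 := by
  rw [PySem.Str.count_eq, bTally_eq]
  norm_num [count_singleton, show (";".toList) = [';'] from rfl]

-- ===== VERDICT (by name: the statement is the Claim_ definition above) =====
theorem check_text_file_type_spec : Claim_equal_check_text_file_type := by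
  intro rows _
  show check_text_file_type rows = check_text_file_type_alt rows
  cases rows with
  | nil =>
    simp [check_text_file_type, check_text_file_type_alt, aGo, aCounts,
      PySem.Set.ofList, PySem.Set.len]
  | cons first rest =>
    rw [check_text_file_type, check_text_file_type_alt]
    simp only [aGo, aCounts_eq_map, List.map_cons]
    rw [setlen_one_eq_all, setlen_one_eq_all, setlen_one_eq_all]
    simp only [flags_fold, Bool.true_and, List.all_map, Function.comp_def,
      countTab, countComma, countSemi]
    simp [PySem.List.pyGetD, PySem.List.pyGet?, PySem.List.pyIdx?]
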